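-- pv_equiv track=rewrite | github.com/AddagallaSaiTharun/Household-Services | backend/application/utils/validation.py | replace_with_ascii
-- ===== SOURCE A (Python) =====
-- def replace_with_ascii(input_str):
--     # Create a mapping of characters to their ASCII values
--     ascii_map = {
--         '.': '@',
--         '/': '*',
--         ':': '#'
--     }
--     # Replace characters in the input string with their ASCII values
--     for char, ascii_value in ascii_map.items():
--         input_str = input_str.replace(char, ascii_value)
--
--     return input_str
-- ===== SOURCE B (Python) =====
-- def replace_with_ascii(input_str):
--     # Same mapping, but one single pass over the string with a per-character
--     # table lookup instead of three full .replace scans.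
--     ascii_map = {
--         '.': '@',
--         '/': '*',
--         ':': '#'
--     }
--     return "".join(ascii_map.get(c, c) for c in input_str)
-- ===== Notes on version B (the rewrite author's own statement) =====
-- stated objective: idiomatic
-- what changed: B replaces the loop of three sequential str.replace scans by a single pass over the characters, emitting ascii_map.get(c, c) for each and joining; equivalent because no replacement output is itself a key.
import Mathlib
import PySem

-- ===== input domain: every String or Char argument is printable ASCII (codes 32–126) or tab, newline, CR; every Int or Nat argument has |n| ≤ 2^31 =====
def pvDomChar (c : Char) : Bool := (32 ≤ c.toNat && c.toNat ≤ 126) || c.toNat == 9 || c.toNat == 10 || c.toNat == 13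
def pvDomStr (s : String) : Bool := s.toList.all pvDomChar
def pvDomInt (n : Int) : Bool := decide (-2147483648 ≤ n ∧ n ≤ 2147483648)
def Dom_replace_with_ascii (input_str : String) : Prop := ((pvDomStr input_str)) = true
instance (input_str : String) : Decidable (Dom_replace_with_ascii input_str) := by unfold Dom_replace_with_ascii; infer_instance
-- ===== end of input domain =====

-- B makes one pass over the characters with a table lookup instead of three sequential .replace scans (idiomatic; same result since no replacement output is itself a key).

-- ===== PORT A =====
-- ascii_map = {'.': '@', '/': '*', ':': '#'}
def pvAsciiMap : PySem.Dict String String := ⟨[(".", "@"), ("/", "*"), (":", "#")]⟩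

-- for char, ascii_value in ascii_map.items(): input_str = input_str.replace(char, ascii_value)
def replace_with_ascii (input_str : String) : String :=
  (PySem.Dict.items pvAsciiMap).foldl
    (fun s p => PySem.Str.replace s p.1 p.2) input_str

-- ===== PORT B =====
-- "".join(ascii_map.get(c, c) for c in input_str)
def replace_with_ascii_alt (input_str : String) : String :=
  PySem.Str.join ""
    (input_str.toList.map (fun c =>
      PySem.Dict.getD pvAsciiMap (String.singleton c) (String.singleton c)))

-- ===== PRECONDITION & SPEC =====
def Spec_replace_with_ascii (input_str : String) (out : String) : Prop := out = replace_with_ascii_alt input_str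
instance (input_str : String) (out : String) : Decidable (Spec_replace_with_ascii input_str out) := by unfold Spec_replace_with_ascii; infer_instance

-- ===== CLAIM (what is proved, stated in full; the proofs are below) =====
def Claim_equal_replace_with_ascii : Prop := ∀ (input_str : String), Dom_replace_with_ascii input_str → Spec_replace_with_ascii input_str (replace_with_ascii input_str)

-- ===== LEMMAS AND PROOFS =====

-- replace.go with a single-char pattern is map-with-substitution
theorem pv_go_single (o d : Char) (l : List Char) :
    ∀ (fuel : Nat) (acc : List Char), l.length ≤ fuel →
      PySem.Chars.replace.go [o] [d] fuel l acc
        = acc.reverse ++ l.map (fun c => if c = o then d else c) := by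
  induction l with
  | nil =>
      intro fuel acc _
      cases fuel <;> simp [PySem.Chars.replace.go]
  | cons c t ih =>
      intro fuel acc h
      cases fuel with
      | zero => simp at h
      | succ n =>
        simp only [PySem.Chars.replace.go, List.isPrefixOf, List.length_cons] at *
        by_cases hc : c = o
        · simp [hc, ih n (d :: acc) (by omega)]
        · have hb : (o == c) = false := by simp; exact fun e => hc e.symm
          simp [hb, hc, ih n (c :: acc) (by omega)]

theorem pv_replace_single (s : List Char) (o d : Char) :
    PySem.Chars.replace s [o] [d] = s.map (fun c => if c = o then d else c) := by
  simp [PySem.Chars.replace, pv_go_single o d s s.length [] le_rfl]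

-- join with empty separator is flatten
theorem pv_join_nil_flatten (parts : List (List Char)) :
    PySem.Chars.join [] parts = parts.flatten := by
  induction parts with
  | nil => simp [PySem.Chars.join, List.intercalate]
  | cons p ps ih =>
      cases ps with
      | nil => simp [PySem.Chars.join, List.intercalate]
      | cons q qs =>
          rw [PySem.Chars.join_cons_cons, ih]
          simp

-- ===== VERDICT (by name: the statement is the Claim_ definition above) =====
theorem replace_with_ascii_spec : Claim_equal_replace_with_ascii := by
  intro s _
  unfold Spec_replace_with_ascii replace_with_ascii replace_with_ascii_alt
  apply String.toList_injective
  simp only [pvAsciiMap, List.foldl, PySem.Str.toList_replace, PySem.Str.toList_join]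
  have e1 : (".":String).toList = ['.'] := rfl
  have e2 : ("@":String).toList = ['@'] := rfl
  have e3 : ("/":String).toList = ['/'] := rfl
  have e4 : ("*":String).toList = ['*'] := rfl
  have e5 : (":":String).toList = [':'] := rfl
  have e6 : ("#":String).toList = ['#'] := rfl
  have e0 : ("":String).toList = [] := rfl
  rw [e1, e2, e3, e4, e5, e6, e0,
      pv_replace_single, pv_replace_single, pv_replace_single, pv_join_nil_flatten]
  simp only [List.map_map, List.map_map]
  induction s.toList with
  | nil => simp
  | cons c t ih =>
      simp only [List.map_cons, List.map_cons, List.flatten_cons, Function.comp] at *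
      rw [← ih]
      by_cases h1 : c = '.' <;> by_cases h2 : c = '/' <;> by_cases h3 : c = ':' <;>
        subst_vars <;>
        simp_all [PySem.Dict.getD, PySem.Dict.get?, String.singleton]
      have hb1 : ((("." : String)) == "".push c) = false := by
        simp only [beq_eq_false_iff_ne, ne_eq]
        intro h; apply h1; have := congrArg String.toList h.symm; simpa using this
      have hb2 : ((("/" : String)) == "".push c) = false := by
        simp only [beq_eq_false_iff_ne, ne_eq]
        intro h; apply h2; have := congrArg String.toList h.symm; simpa using this
      have hb3 : (((":" : String)) == "".push c) = false := by
        simp only [beq_eq_false_iff_ne, ne_eq]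
        intro h; apply h3; have := congrArg String.toList h.symm; simpa using this
      simp [hb1, hb2, hb3]
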